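-- pv_equiv track=rewrite | github.com/Hilal-Anwar/Python_Tutorial | oppes/test2.py | more_than_two_unique_vowels
-- ===== SOURCE A (Python) =====
-- def more_than_two_unique_vowels(sentence):
--     li = []
--     l = sentence.split(',')
--     for item in l:
--         c = 0
--         for char in item.lower():
--             if char in 'aeiou':
--                 c += 1
--         if c > 2:
--             li.append(item)
--     return set(li)
-- ===== SOURCE B (Python) =====
-- def more_than_two_unique_vowels(sentence):
--     result = []
--     buf = []
--     c = 0
--     for ch in sentence:
--         if ch == ',':
--             if c > 2:
--                 result.append(''.join(buf))
--             buf = []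
--             c = 0
--         else:
--             buf.append(ch)
--             if ch.lower() in 'aeiou':
--                 c += 1
--     if c > 2:
--         result.append(''.join(buf))
--     return set(result)
-- ===== Notes on version B (the rewrite author's own statement) =====
-- stated objective: alternative
-- what changed: Replaces split-then-rescan (split on commas, then a second loop counting vowels in each item) by a single character-level pass over the raw string that maintains a current-item buffer and a running vowel counter and flushes qualifying items at each comma.
import Mathlib
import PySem

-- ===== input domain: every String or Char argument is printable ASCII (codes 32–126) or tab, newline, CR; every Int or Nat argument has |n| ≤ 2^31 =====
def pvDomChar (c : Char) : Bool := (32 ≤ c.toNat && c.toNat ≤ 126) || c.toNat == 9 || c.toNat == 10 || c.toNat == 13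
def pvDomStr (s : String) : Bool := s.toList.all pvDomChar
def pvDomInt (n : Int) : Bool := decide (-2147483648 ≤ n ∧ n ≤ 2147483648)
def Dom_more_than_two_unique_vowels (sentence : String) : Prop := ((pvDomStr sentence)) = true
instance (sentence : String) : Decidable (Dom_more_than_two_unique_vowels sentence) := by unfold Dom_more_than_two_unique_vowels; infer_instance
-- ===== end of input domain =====

-- B replaces split-then-rescan with one character-level pass that keeps a current-item buffer
-- and a running vowel counter, flushing at each comma (objective: alternative decomposition).

-- ===== PORT A =====
def more_than_two_unique_vowels (sentence : String) : List String :=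
  let l := (PySem.Str.split? sentence ",").getD []
  let li := l.foldl (fun li item =>
    let c : Int := (PySem.Str.lower item).toList.foldl
      -- 'char in "aeiou"' : exact as char membership since char has length 1
      (fun c char => if ("aeiou".toList.contains char) then c + 1 else c) 0
    if c > 2 then li ++ [item] else li) ([] : List String)
  PySem.Set.ofList li

-- ===== PORT B =====
-- single pass: state = (collected items, current buffer, vowel count of the buffer);
-- pvStep is the loop body of Source B's for-loop
def pvStep (st : List String × List Char × Int) (ch : Char) : List String × List Char × Int :=
  if ch = ',' then
    ((if st.2.2 > 2 then st.1 ++ [String.ofList st.2.1] else st.1), [], 0)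
  else
    -- 'ch.lower() in "aeiou"' : exact as per-char lowering + char membership (ch has length 1)
    (st.1, st.2.1 ++ [ch],
      if ("aeiou".toList.contains (PySem.Chars.lowerChar ch)) then st.2.2 + 1 else st.2.2)

def more_than_two_unique_vowels_alt (sentence : String) : List String :=
  let st := sentence.toList.foldl pvStep (([] : List String), ([] : List Char), (0 : Int))
  PySem.Set.ofList (if st.2.2 > 2 then st.1 ++ [String.ofList st.2.1] else st.1)

-- ===== PRECONDITION & SPEC =====
def Spec_more_than_two_unique_vowels (sentence : String) (out : List String) : Prop := out = more_than_two_unique_vowels_alt sentence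
instance (sentence : String) (out : List String) : Decidable (Spec_more_than_two_unique_vowels sentence out) := by unfold Spec_more_than_two_unique_vowels; infer_instance

-- ===== CLAIM (what is proved, stated in full; the proofs are below) =====
def Claim_equal_more_than_two_unique_vowels : Prop := ∀ (sentence : String), Dom_more_than_two_unique_vowels sentence → Spec_more_than_two_unique_vowels sentence (more_than_two_unique_vowels sentence)

-- ===== LEMMAS AND PROOFS =====

-- vowel test on a (lowered) character
def pvIsVow (ch : Char) : Bool := "aeiou".toList.contains (PySem.Chars.lowerChar ch)

-- number of vowels in a chunk
def pvVc (w : List Char) : Nat := w.countP pvIsVow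

-- simple left-to-right comma split (reference model for both sides)
def pvSplit1 : List Char → List (List Char)
  | [] => [[]]
  | ch :: rest => if ch = ',' then [] :: pvSplit1 rest
                  else match pvSplit1 rest with
                       | [] => [[ch]]
                       | h :: t => (ch :: h) :: t

-- prepend to the head chunk
def pvConsHead (p : List Char) : List (List Char) → List (List Char)
  | [] => [p]
  | h :: t => (p ++ h) :: t

lemma pvConsHead_nil (l : List (List Char)) : pvConsHead [] l = match l with | [] => [[]] | h :: t => h :: t := by
  cases l <;> simp [pvConsHead]

lemma pvSplit1_ne_nil (l : List Char) : pvSplit1 l ≠ [] := by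
  cases l with
  | nil => simp [pvSplit1]
  | cons ch rest =>
    simp only [pvSplit1]
    split
    · simp
    · cases h : pvSplit1 rest <;> simp

-- PySem's fueled splitter, specialised to the one-character separator ','
lemma splitOn_go_comma (l : List Char) : ∀ (fuel : Nat) (cur : List Char) (acc : List (List Char)),
    l.length ≤ fuel →
    PySem.Chars.splitOn.go [','] fuel l cur acc
      = acc.reverse ++ pvConsHead cur.reverse (pvSplit1 l) := by
  induction l with
  | nil =>
    intro fuel cur acc _
    cases fuel <;> simp [PySem.Chars.splitOn.go, pvSplit1, pvConsHead]
  | cons ch rest ih =>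
    intro fuel cur acc hf
    cases fuel with
    | zero => simp at hf
    | succ fuel =>
      simp only [PySem.Chars.splitOn.go]
      by_cases hch : ch = ','
      · subst hch
        have hpre : List.isPrefixOf [','] (',' :: rest) = true := by
          simp [List.isPrefixOf]
        rw [if_pos hpre]
        have := ih fuel [] (cur.reverse :: acc) (by simpa using Nat.le_of_succ_le_succ hf)
        simp only [List.length_cons, List.length_nil,
          List.drop_succ_cons, List.drop_zero] at this ⊢
        rw [this]
        have hne := pvSplit1_ne_nil rest
        cases hr : pvSplit1 rest with
        | nil => exact absurd hr hne
        | cons h t => simp [pvSplit1, pvConsHead, hr]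
      · have hpre : List.isPrefixOf [','] (ch :: rest) = false := by
          simp [List.isPrefixOf]
          exact fun h => hch h.symm
        rw [if_neg (by simp [hpre])]
        have := ih fuel (ch :: cur) acc (by simpa using Nat.le_of_succ_le_succ hf)
        rw [this]
        have hne := pvSplit1_ne_nil rest
        cases hr : pvSplit1 rest with
        | nil => exact absurd hr hne
        | cons h t =>
          simp [pvSplit1, hch, pvConsHead, hr]

lemma splitOn_comma (l : List Char) : PySem.Chars.splitOn l [','] = pvSplit1 l := by
  unfold PySem.Chars.splitOn
  rw [splitOn_go_comma l (l.length + 1) [] [] (Nat.le_succ _)]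
  have hne := pvSplit1_ne_nil l
  cases hr : pvSplit1 l with
  | nil => exact absurd hr hne
  | cons h t => simp [pvConsHead]

-- the per-chunk predicate both sides use (A counts on the lowered item; lowering is charwise)
def pvPred (w : List Char) : Bool := decide ((pvVc w : Int) > 2)

lemma countP_lower (w : List Char) :
    (PySem.Chars.lower w).countP (['a','e','i','o','u'].contains) = pvVc w := by
  unfold pvVc
  rw [PySem.Chars.lower, List.countP_map]
  apply List.countP_congr
  intro ch _
  simp [pvIsVow, Function.comp]

-- B's fold invariant: with c the vowel count of buf, the flushed fold result is
-- res ++ the qualifying chunks of buf-prefixed split of l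
lemma b_fold_spec (l : List Char) : ∀ (res : List String) (buf : List Char),
    (let st := l.foldl pvStep (res, buf, (pvVc buf : Int))
     if st.2.2 > 2 then st.1 ++ [String.ofList st.2.1] else st.1)
      = res ++ ((pvConsHead buf (pvSplit1 l)).filter pvPred).map String.ofList := by
  induction l with
  | nil =>
    intro res buf
    simp only [List.foldl_nil, pvSplit1, pvConsHead, List.append_nil, List.filter]
    by_cases h : (pvVc buf : Int) > 2 <;> simp [h, pvPred]
  | cons ch rest ih =>
    intro res buf
    by_cases hch : ch = ','
    · subst hch
      have hstep : pvStep (res, buf, (pvVc buf : Int)) ','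
          = ((if (pvVc buf : Int) > 2 then res ++ [String.ofList buf] else res), [], (pvVc ([] : List Char) : Int)) := by
        simp [pvStep, pvVc]
      simp only [List.foldl_cons, hstep]
      rw [ih]
      have hne := pvSplit1_ne_nil rest
      cases hr : pvSplit1 rest with
      | nil => exact absurd hr hne
      | cons h t =>
        by_cases hp : (pvVc buf : Int) > 2 <;>
          simp [pvSplit1, hr, pvConsHead, hp, pvPred, List.filter]
    · have hstep : pvStep (res, buf, (pvVc buf : Int)) ch
          = (res, buf ++ [ch], (pvVc (buf ++ [ch]) : Int)) := by
        simp only [pvStep, if_neg hch, pvVc, List.countP_append, List.countP_cons,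
          List.countP_nil, pvIsVow]
        split_ifs <;> simp_all
      simp only [List.foldl_cons, hstep]
      rw [ih]
      have hne := pvSplit1_ne_nil rest
      cases hr : pvSplit1 rest with
      | nil => exact absurd hr hne
      | cons h t =>
        simp [pvSplit1, hch, hr, pvConsHead]

theorem more_than_two_unique_vowels_spec : Claim_equal_more_than_two_unique_vowels := by
  intro sentence _
  unfold Spec_more_than_two_unique_vowels more_than_two_unique_vowels more_than_two_unique_vowels_alt
  -- A side: split, then foldl-filter, then count via countP
  have hsplit : (PySem.Str.split? sentence ",").getD []
      = (pvSplit1 sentence.toList).map String.ofList := by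
    simp [PySem.Str.split?, PySem.Chars.split?, splitOn_comma]
  simp only [hsplit, PySem.List.foldl_append_ite_eq_filter, List.nil_append,
    PySem.List.foldl_if_add_one, zero_add]
  -- B side: the fold invariant with empty initial state
  have hb := b_fold_spec sentence.toList [] []
  simp only [pvVc, List.countP_nil, Nat.cast_zero] at hb
  refine Eq.trans ?_ (congrArg PySem.Set.ofList hb).symm
  simp only [List.nil_append, pvConsHead_nil]
  have hne := pvSplit1_ne_nil sentence.toList
  have hhead : (match pvSplit1 sentence.toList with
      | [] => [([] : List Char)] | h :: t => h :: t) = pvSplit1 sentence.toList := by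
    cases hr : pvSplit1 sentence.toList with
    | nil => exact absurd hr hne
    | cons h t => rfl
  rw [hhead]
  apply congrArg
  rw [List.filter_map]
  apply congrArg
  apply List.filter_congr
  intro w _
  simp [Function.comp, PySem.Str.toList_lower, countP_lower, pvPred]
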